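-- pv_equiv track=rewrite | github.com/Bartholomew125/H8-Datalogi | evaluate.py | ExtractPropositions
-- ===== SOURCE A (Python) =====
-- def ExtractPropositions(statement:str, split_from:str) -> tuple:
--
--     # Get the index of the split point
--     split_index = statement.find(split_from)
--
--     # Remove logical operator from split point
--     statement = statement.replace(split_from,"",1)
--
--     # Check left side
--     if statement[split_index-1] not in "()":
--         left = statement[split_index-1]
--
--     else:
--         parenthesis_counter = 0
--         left_index = split_index-1
--         while True:
--             if statement[left_index] == ")":
--                 parenthesis_counter += 1
--             elif statement[left_index] == "(":
--                 parenthesis_counter -= 1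
--
--             if parenthesis_counter == 0:
--                 left = statement[left_index:split_index]
--                 break
--
--             left_index -= 1
--
--
--     # Check right side
--     if statement[split_index] not in "()":
--         right = statement[split_index]
--
--     else:
--         parenthesis_counter = 0
--         right_index = split_index
--         while True:
--             if statement[right_index] == ")":
--                 parenthesis_counter += 1
--             elif statement[right_index] == "(":
--                 parenthesis_counter -= 1
--
--             if parenthesis_counter == 0:
--                 right = statement[split_index:right_index]
--                 break
--
--             right_index += 1
--
--
--     return left,right
-- ===== SOURCE B (Python) =====
-- def ExtractPropositions(statement: str, split_from: str) -> tuple: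
--     i = statement.find(split_from)
--     s = statement.replace(split_from, "", 1)
--     # prefix balances: d[k] = number of '(' minus number of ')' in s[:k]
--     d = [0]
--     b = 0
--     for c in s:
--         b += (c == '(') - (c == ')')
--         d.append(b)
--     if s[i - 1] not in "()":
--         left = s[i - 1]
--     else:
--         j = max(j for j in range(i) if d[j] == d[i])
--         left = s[j:i]
--     if s[i] not in "()":
--         right = s[i]
--     else:
--         q = min(q for q in range(i, len(s)) if d[q + 1] == d[i])
--         right = s[i:q]
--     return left, right
-- ===== Notes on version B (the rewrite author's own statement) =====
-- stated objective: alternative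
-- what changed: A's two stateful while-loops (a backward and a forward parenthesis-counter scan) are replaced by one precomputed prefix-balance table over the whole statement plus a max/min search for the nearest index with the same balance value as the split point.
-- outside the precondition, e.g. on ExtractPropositions('(b (())', 'a'): A returns ('()', ''), B raises ValueError; on ExtractPropositions(')((^b)a^bb(|', '('): A returns ('', '(^b'), B raises ValueError
import Mathlib
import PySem

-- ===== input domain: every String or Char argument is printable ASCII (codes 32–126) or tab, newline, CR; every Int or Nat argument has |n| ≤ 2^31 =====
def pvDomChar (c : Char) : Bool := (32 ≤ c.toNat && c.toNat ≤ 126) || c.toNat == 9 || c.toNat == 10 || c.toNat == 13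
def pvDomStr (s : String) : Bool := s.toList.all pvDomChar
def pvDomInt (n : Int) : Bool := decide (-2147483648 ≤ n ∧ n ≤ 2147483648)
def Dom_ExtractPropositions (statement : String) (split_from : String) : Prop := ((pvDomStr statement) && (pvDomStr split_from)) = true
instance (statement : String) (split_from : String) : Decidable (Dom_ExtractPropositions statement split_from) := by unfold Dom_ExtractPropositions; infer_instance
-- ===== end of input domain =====

-- B replaces A's two stateful counter scans by one precomputed prefix-balance table plus a
-- max/min search for an index of equal balance (objective: alternative decomposition, same cost).

-- shared primitive: Python's s.replace(old, "", 1) — remove the FIRST occurrence of old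
-- (exact: find gives the first match; old = "" gives find = 0 and returns s unchanged, as CPython does)
def pvReplaceOnce (s old : List Char) : List Char :=
  let i := PySem.Chars.find s old
  if i < 0 then s else s.take i.toNat ++ s.drop (i.toNat + old.length)

-- ===== PORT A =====
-- A's backward 'while True' left scan; fuel only makes the recursion structural — inside Pre_
-- the loop always stops (counter = 0 or IndexError = none) before fuel runs out.
def pvLoopL (cs : List Char) : Nat → Int → Int → Option Int
  | 0, _, _ => none
  | fuel+1, counter, idx =>
    match PySem.List.pyGet? cs idx with
    | none => none  -- Python raises IndexError here
    | some ch =>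
      let counter := if ch = ')' then counter + 1 else if ch = '(' then counter - 1 else counter
      if counter = 0 then some idx
      else pvLoopL cs fuel counter (idx - 1)

-- A's forward 'while True' right scan
def pvLoopR (cs : List Char) : Nat → Int → Int → Option Int
  | 0, _, _ => none
  | fuel+1, counter, idx =>
    match PySem.List.pyGet? cs idx with
    | none => none  -- Python raises IndexError here
    | some ch =>
      let counter := if ch = ')' then counter + 1 else if ch = '(' then counter - 1 else counter
      if counter = 0 then some idx
      else pvLoopR cs fuel counter (idx + 1)

def ExtractPropositions (statement : String) (split_from : String) : String × String :=
  let split_index := PySem.Str.find statement split_from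
  let cs := pvReplaceOnce statement.toList split_from.toList
  let left : List Char :=
    match PySem.List.pyGet? cs (split_index - 1) with
    | none => []  -- Python raises IndexError (outside Pre_)
    | some c =>
      if ¬ (c = '(' ∨ c = ')') then [c]
      else
        match pvLoopL cs (split_index.toNat + cs.length + 2) 0 (split_index - 1) with
        | none => []  -- Python raises IndexError (outside Pre_)
        | some li => PySem.List.slice cs (some li) (some split_index)
  let right : List Char :=
    match PySem.List.pyGet? cs split_index with
    | none => []  -- Python raises IndexError (outside Pre_)
    | some c =>
      if ¬ (c = '(' ∨ c = ')') then [c]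
      else
        match pvLoopR cs (cs.length + 3) 0 split_index with
        | none => []  -- Python raises IndexError (outside Pre_)
        | some ri => PySem.List.slice cs (some split_index) (some ri)
  (String.ofList left, String.ofList right)

-- ===== PORT B =====
-- running prefix balances: 'for c in s: b += (c=='(')-(c==')'); d.append(b)'
def pvBuildD (b : Int) : List Char → List Int
  | [] => []
  | c :: rest =>
    let b' := b + (if c = '(' then 1 else 0) - (if c = ')' then 1 else 0)
    b' :: pvBuildD b' rest

def ExtractPropositions_alt (statement : String) (split_from : String) : String × String :=
  let i := PySem.Str.find statement split_from
  let cs := pvReplaceOnce statement.toList split_from.toList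
  let d : List Int := 0 :: pvBuildD 0 cs
  let left : List Char :=
    match PySem.List.pyGet? cs (i - 1) with
    | none => []  -- Python raises IndexError (outside Pre_)
    | some c =>
      if ¬ (c = '(' ∨ c = ')') then [c]
      else
        match PySem.List.max? ((PySem.List.pyRange 0 i).filter
            (fun j => PySem.List.pyGetD d j 0 == PySem.List.pyGetD d i 0)) (fun x => x) with
        | none => []  -- Python: max() of an empty generator raises ValueError (outside Pre_)
        | some j => PySem.List.slice cs (some j) (some i)
  let right : List Char :=
    match PySem.List.pyGet? cs i with
    | none => []  -- Python raises IndexError (outside Pre_)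
    | some c =>
      if ¬ (c = '(' ∨ c = ')') then [c]
      else
        match PySem.List.min? ((PySem.List.pyRange i (cs.length : Int)).filter
            (fun q => PySem.List.pyGetD d (q + 1) 0 == PySem.List.pyGetD d i 0)) (fun x => x) with
        | none => []  -- Python: min() of an empty generator raises ValueError (outside Pre_)
        | some q => PySem.List.slice cs (some i) (some q)
  (String.ofList left, String.ofList right)

-- ===== PRECONDITION & SPEC =====
-- prefix balance: number of '(' minus number of ')' among the first k characters
def pvBal (cs : List Char) (k : Nat) : Int :=
  ((cs.take k).count '(' : Int) - ((cs.take k).count ')' : Int)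

-- Pre_ excludes the inputs where A raises (operator at the very edge / empty statement) and the
-- malformed inputs — operator absent, or flanked by a parenthesis with no balancing index — on
-- which A's local scans run through Python's negative-index wraparound and return accidental
-- slices or raise, while B's search over the balance table raises ValueError.
def Pre_ExtractPropositions (statement : String) (split_from : String) : Prop :=
  let i := PySem.Str.find statement split_from
  let cs := pvReplaceOnce statement.toList split_from.toList
  (PySem.List.pyGet? cs (i - 1)).isSome = true ∧
  (PySem.List.pyGet? cs i).isSome = true ∧
  ((PySem.List.pyGet? cs (i - 1) = some '(' ∨ PySem.List.pyGet? cs (i - 1) = some ')') →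
    ∃ j < i.toNat, pvBal cs j = pvBal cs i.toNat) ∧
  ((PySem.List.pyGet? cs i = some '(' ∨ PySem.List.pyGet? cs i = some ')') →
    0 ≤ i ∧ ∃ q < cs.length, i.toNat ≤ q ∧ pvBal cs (q + 1) = pvBal cs i.toNat)

instance (statement : String) (split_from : String) : Decidable (Pre_ExtractPropositions statement split_from) := by
  unfold Pre_ExtractPropositions; infer_instance

def pvWitness_ExtractPropositions : String × String := ("(a)&b", "&")

def Spec_ExtractPropositions (statement : String) (split_from : String) (out : String × String) : Prop := out = ExtractPropositions_alt statement split_from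
instance (statement : String) (split_from : String) (out : String × String) : Decidable (Spec_ExtractPropositions statement split_from out) := by unfold Spec_ExtractPropositions; infer_instance

-- ===== CLAIM (what is proved, stated in full; the proofs are below) =====
def Claim_equal_ExtractPropositions : Prop := ∀ (statement : String) (split_from : String), Dom_ExtractPropositions statement split_from → Pre_ExtractPropositions statement split_from → Spec_ExtractPropositions statement split_from (ExtractPropositions statement split_from)

-- ===== LEMMAS AND PROOFS =====

theorem pvBal_succ (cs : List Char) (m : Nat) (hm : m < cs.length) :
    pvBal cs (m + 1) = pvBal cs m + (if cs[m] = '(' then 1 else 0) - (if cs[m] = ')' then 1 else 0) := by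
  have htake : cs.take (m + 1) = cs.take m ++ [cs[m]] := by
    rw [List.take_succ, List.getElem?_eq_getElem hm]
    rfl
  unfold pvBal
  rw [htake, List.count_append, List.count_append]
  by_cases h1 : cs[m] = '(' <;> by_cases h2 : cs[m] = ')' <;>
    simp [h1, h2] <;> push_cast <;> ring

theorem pvBuildD_getD (cs : List Char) : ∀ (k : Nat) (b : Int), k ≤ cs.length →
    (b :: pvBuildD b cs).getD k 0 = b + pvBal cs k := by
  induction cs with
  | nil =>
    intro k b hk
    have hk0 : k = 0 := by simpa using hk
    subst hk0
    simp [pvBal]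
  | cons c tl ih =>
    intro k b hk
    cases k with
    | zero => simp [pvBal]
    | succ k =>
      show (pvBuildD b (c :: tl)).getD k 0 = b + pvBal (c :: tl) (k + 1)
      have hb : pvBuildD b (c :: tl)
          = (b + (if c = '(' then 1 else 0) - (if c = ')' then 1 else 0))
            :: pvBuildD (b + (if c = '(' then 1 else 0) - (if c = ')' then 1 else 0)) tl := rfl
      rw [hb, ih k _ (by simpa using hk)]
      have hcons : pvBal (c :: tl) (k + 1)
          = (if c = '(' then 1 else 0) - (if c = ')' then 1 else 0) + pvBal tl k := by
        unfold pvBal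
        rw [List.take_succ_cons]
        by_cases h1 : c = '(' <;> by_cases h2 : c = ')' <;>
          simp [h1, h2, List.count_cons] <;> push_cast <;> ring
      rw [hcons]
      ring

theorem pvD_eq_bal (cs : List Char) (k : Nat) (hk : k ≤ cs.length) :
    PySem.List.pyGetD (0 :: pvBuildD 0 cs) (k : Int) 0 = pvBal cs k := by
  rw [PySem.List.pyGetD_natCast]
  simpa using pvBuildD_getD cs k 0 hk

theorem pvLoopL_spec (cs : List Char) (t : Int) (j0 : Nat)
    (hP : pvBal cs j0 = t) :
    ∀ (fuel m : Nat), j0 ≤ m → m < cs.length →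
      (∀ k, j0 < k → k ≤ m → pvBal cs k ≠ t) →
      m < fuel →
      pvLoopL cs fuel (pvBal cs (m + 1) - t) (m : Int) = some (j0 : Int) := by
  intro fuel
  induction fuel with
  | zero => intro m _ _ _ h; omega
  | succ fuel ih =>
    intro m hj0 hm hgr hfuel
    rw [pvLoopL]
    rw [PySem.List.pyGet?_natCast, List.getElem?_eq_getElem hm]
    dsimp only
    have hcnt : (if cs[m] = ')' then pvBal cs (m + 1) - t + 1
        else if cs[m] = '(' then pvBal cs (m + 1) - t - 1 else pvBal cs (m + 1) - t)
        = pvBal cs m - t := by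
      rw [pvBal_succ cs m hm]
      by_cases h1 : cs[m] = '(' <;> by_cases h2 : cs[m] = ')' <;> simp [h1, h2] <;> ring
    rw [hcnt]
    by_cases hm0 : m = j0
    · subst hm0
      rw [hP]
      simp
    · have hlt : j0 < m := lt_of_le_of_ne hj0 (Ne.symm hm0)
      have hne : pvBal cs m - t ≠ 0 := sub_ne_zero.mpr (hgr m hlt le_rfl)
      rw [if_neg hne]
      have hm1 : (m : Int) - 1 = ((m - 1 : Nat) : Int) := by omega
      have hm2 : pvBal cs m - t = pvBal cs ((m - 1) + 1) - t := by
        have : (m - 1) + 1 = m := by omega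
        rw [this]
      rw [hm1, hm2]
      exact ih (m - 1) (by omega) (by omega) (fun k hk1 hk2 => hgr k hk1 (by omega)) (by omega)

theorem pvLoopR_spec (cs : List Char) (t : Int) (r0 : Nat)
    (hP : pvBal cs (r0 + 1) = t) (hr0 : r0 < cs.length) :
    ∀ (fuel q : Nat), q ≤ r0 →
      (∀ r, q ≤ r → r < r0 → pvBal cs (r + 1) ≠ t) →
      cs.length - q < fuel →
      pvLoopR cs fuel (t - pvBal cs q) (q : Int) = some (r0 : Int) := by
  intro fuel
  induction fuel with
  | zero => intro q hq _ h; omega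
  | succ fuel ih =>
    intro q hq hmin hfuel
    have hqlen : q < cs.length := by omega
    rw [pvLoopR]
    rw [PySem.List.pyGet?_natCast, List.getElem?_eq_getElem hqlen]
    dsimp only
    have hcnt : (if cs[q] = ')' then t - pvBal cs q + 1
        else if cs[q] = '(' then t - pvBal cs q - 1 else t - pvBal cs q)
        = t - pvBal cs (q + 1) := by
      rw [pvBal_succ cs q hqlen]
      by_cases h1 : cs[q] = '(' <;> by_cases h2 : cs[q] = ')' <;> simp [h1, h2] <;> ring
    rw [hcnt]
    by_cases hq0 : q = r0
    · subst hq0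
      rw [hP]
      simp
    · have hlt : q < r0 := lt_of_le_of_ne hq hq0
      have hne : t - pvBal cs (q + 1) ≠ 0 := fun h =>
        hmin q le_rfl hlt (by omega)
      rw [if_neg hne]
      have hq1 : (q : Int) + 1 = ((q + 1 : Nat) : Int) := by omega
      rw [hq1]
      exact ih (q + 1) (by omega) (fun r ha hb => hmin r (by omega) hb) (by omega)

theorem pvMax?_eq (xs : List Int) (m : Int) (hm : m ∈ xs) (hmax : ∀ y ∈ xs, y ≤ m) :
    PySem.List.max? xs (fun x => x) = some m := by
  cases h : PySem.List.max? xs (fun x => x) with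
  | none => exact absurd ((PySem.List.max?_eq_none_iff xs _).1 h ▸ hm) (List.not_mem_nil)
  | some m' =>
    have h1 : m' ≤ m := hmax m' (PySem.List.max?_mem h)
    have h2 : m ≤ m' := PySem.List.max?_isMax h m hm
    exact congrArg some (le_antisymm h1 h2)

theorem pvMin?_eq (xs : List Int) (m : Int) (hm : m ∈ xs) (hmin : ∀ y ∈ xs, m ≤ y) :
    PySem.List.min? xs (fun x => x) = some m := by
  cases h : PySem.List.min? xs (fun x => x) with
  | none => exact absurd ((PySem.List.min?_eq_none_iff xs _).1 h ▸ hm) (List.not_mem_nil)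
  | some m' =>
    have h1 : m ≤ m' := hmin m' (PySem.List.min?_mem h)
    have h2 : m' ≤ m := PySem.List.min?_isMin h m hm
    exact congrArg some (le_antisymm h2 h1)

theorem pvLeftScan (cs : List Char) (i : Int)
    (hex : ∃ j < i.toNat, pvBal cs j = pvBal cs i.toNat)
    (hlt : i - 1 < (cs.length : Int)) :
    ∃ j0 : Nat, j0 < i.toNat ∧
      pvLoopL cs (i.toNat + cs.length + 2) 0 (i - 1) = some (j0 : Int) ∧
      PySem.List.max? ((PySem.List.pyRange 0 i).filter
        (fun j => PySem.List.pyGetD (0 :: pvBuildD 0 cs) j 0 == PySem.List.pyGetD (0 :: pvBuildD 0 cs) i 0)) (fun x => x) = some (j0 : Int) := by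
  obtain ⟨jw, hjw, hPw⟩ := hex
  have hipos : 1 ≤ i.toNat := by omega
  have hplen : i.toNat - 1 < cs.length := by omega
  have hile : i.toNat ≤ cs.length := by omega
  set t := pvBal cs i.toNat with ht
  set p := i.toNat - 1 with hp
  have hjwp : jw ≤ p := by omega
  set j0 := Nat.findGreatest (fun j => pvBal cs j = t) p with hj0
  have hPj0 : pvBal cs j0 = t := Nat.findGreatest_spec (P := fun j => pvBal cs j = t) hjwp hPw
  have hj0le : j0 ≤ p := Nat.findGreatest_le p
  have hgr : ∀ k, j0 < k → k ≤ p → pvBal cs k ≠ t := fun k hk1 hk2 =>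
    Nat.findGreatest_is_greatest hk1 hk2
  refine ⟨j0, by omega, ?_, ?_⟩
  · have hcast : i - 1 = ((p : Nat) : Int) := by omega
    have h0 : (0 : Int) = pvBal cs (p + 1) - t := by
      have hpi : p + 1 = i.toNat := by omega
      rw [hpi, ht]; ring
    rw [hcast, h0]
    exact pvLoopL_spec cs t j0 hPj0 _ p hj0le hplen hgr (by omega)
  · have e2 : PySem.List.pyGetD (0 :: pvBuildD 0 cs) i 0 = t := by
      have hi' : i = ((i.toNat : Nat) : Int) := by omega
      rw [hi', ht]; exact pvD_eq_bal cs i.toNat hile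
    apply pvMax?_eq
    · refine List.mem_filter.mpr ⟨?_, ?_⟩
      · rw [PySem.List.mem_pyRange_one]
        exact ⟨Int.natCast_nonneg j0, by omega⟩
      · have e1 : PySem.List.pyGetD (0 :: pvBuildD 0 cs) ((j0 : Nat) : Int) 0 = pvBal cs j0 :=
          pvD_eq_bal cs j0 (by omega)
        simp [e1, e2, hPj0]
    · intro y hy
      obtain ⟨hyr, hyp⟩ := List.mem_filter.mp hy
      rw [PySem.List.mem_pyRange_one] at hyr
      obtain ⟨hy0, hyi⟩ := hyr
      have hyn : y = ((y.toNat : Nat) : Int) := by omega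
      have e1 : PySem.List.pyGetD (0 :: pvBuildD 0 cs) y 0 = pvBal cs y.toNat := by
        rw [hyn]; exact pvD_eq_bal cs y.toNat (by omega)
      have hyP : pvBal cs y.toNat = t := by
        rw [e1, e2] at hyp; exact beq_iff_eq.mp hyp
      by_contra hlt'
      push_neg at hlt'
      exact hgr y.toNat (by omega) (by omega) hyP

theorem pvRightScan (cs : List Char) (i : Int)
    (hi0 : 0 ≤ i)
    (hex : ∃ q < cs.length, i.toNat ≤ q ∧ pvBal cs (q + 1) = pvBal cs i.toNat)
    (hlt : i < (cs.length : Int)) :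
    ∃ r0 : Nat, i.toNat ≤ r0 ∧ r0 < cs.length ∧
      pvLoopR cs (cs.length + 3) 0 i = some (r0 : Int) ∧
      PySem.List.min? ((PySem.List.pyRange i (cs.length : Int)).filter
        (fun q => PySem.List.pyGetD (0 :: pvBuildD 0 cs) (q + 1) 0 == PySem.List.pyGetD (0 :: pvBuildD 0 cs) i 0)) (fun x => x) = some (r0 : Int) := by
  set t := pvBal cs i.toNat with ht
  have H : ∃ q, i.toNat ≤ q ∧ q < cs.length ∧ pvBal cs (q + 1) = t := by
    obtain ⟨q, hq1, hq2, hq3⟩ := hex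
    exact ⟨q, hq2, hq1, hq3⟩
  set r0 := Nat.find H with hr0
  obtain ⟨hQ1, hQ2, hQ3⟩ := Nat.find_spec H
  rw [← hr0] at hQ1 hQ2 hQ3
  have hmin : ∀ r, i.toNat ≤ r → r < r0 → pvBal cs (r + 1) ≠ t := fun r ha hb hP =>
    Nat.find_min H hb ⟨ha, by omega, hP⟩
  refine ⟨r0, hQ1, hQ2, ?_, ?_⟩
  · have hcast : i = ((i.toNat : Nat) : Int) := by omega
    have h0 : (0 : Int) = t - pvBal cs i.toNat := by rw [ht]; ring
    rw [hcast, h0]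
    exact pvLoopR_spec cs t r0 hQ3 hQ2 _ i.toNat hQ1 hmin (by omega)
  · have e2 : PySem.List.pyGetD (0 :: pvBuildD 0 cs) i 0 = t := by
      have hi' : i = ((i.toNat : Nat) : Int) := by omega
      rw [hi', ht]; exact pvD_eq_bal cs i.toNat (by omega)
    apply pvMin?_eq
    · refine List.mem_filter.mpr ⟨?_, ?_⟩
      · rw [PySem.List.mem_pyRange_one]
        constructor <;> omega
      · have hc1 : ((r0 : Nat) : Int) + 1 = (((r0 + 1 : Nat)) : Int) := by push_cast; ring
        have e1 : PySem.List.pyGetD (0 :: pvBuildD 0 cs) (((r0 : Nat) : Int) + 1) 0 = pvBal cs (r0 + 1) := by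
          rw [hc1]; exact pvD_eq_bal cs (r0 + 1) (by omega)
        simp [e1, e2, hQ3]
    · intro y hy
      obtain ⟨hyr, hyp⟩ := List.mem_filter.mp hy
      rw [PySem.List.mem_pyRange_one] at hyr
      obtain ⟨hy0, hyi⟩ := hyr
      have hc1 : y + 1 = (((y.toNat + 1 : Nat)) : Int) := by omega
      have e1 : PySem.List.pyGetD (0 :: pvBuildD 0 cs) (y + 1) 0 = pvBal cs (y.toNat + 1) := by
        rw [hc1]; exact pvD_eq_bal cs (y.toNat + 1) (by omega)
      have hyP : pvBal cs (y.toNat + 1) = t := by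
        rw [e1, e2] at hyp; exact beq_iff_eq.mp hyp
      have : r0 ≤ y.toNat := Nat.find_min' H ⟨by omega, by omega, hyP⟩
      omega

-- ===== VERDICT (by name: the statement is the Claim_ definition above) =====
theorem ExtractPropositions_spec : Claim_equal_ExtractPropositions := by
  intro statement split_from _ hPre
  unfold Spec_ExtractPropositions ExtractPropositions ExtractPropositions_alt
  unfold Pre_ExtractPropositions at hPre
  set i := PySem.Str.find statement split_from with hidef
  set cs := pvReplaceOnce statement.toList split_from.toList with hcsdef
  obtain ⟨h1, h2, h3, h4⟩ := hPre
  have hR1 : PySem.Raise.InRange cs.length (i - 1) := by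
    by_contra h
    rw [← PySem.List.pyGet?_eq_none_iff] at h
    rw [h] at h1; simp at h1
  have hR2 : PySem.Raise.InRange cs.length i := by
    by_contra h
    rw [← PySem.List.pyGet?_eq_none_iff] at h
    rw [h] at h2; simp at h2
  unfold PySem.Raise.InRange at hR1 hR2
  obtain ⟨cL, hcL⟩ := Option.isSome_iff_exists.mp h1
  obtain ⟨cR, hcR⟩ := Option.isSome_iff_exists.mp h2
  dsimp only
  rw [hcL, hcR]
  dsimp only
  have hLeft : (if ¬ (cL = '(' ∨ cL = ')') then [cL]
      else match pvLoopL cs (i.toNat + cs.length + 2) 0 (i - 1) with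
        | none => ([] : List Char)
        | some li => PySem.List.slice cs (some li) (some i))
      = (if ¬ (cL = '(' ∨ cL = ')') then [cL]
      else match PySem.List.max? ((PySem.List.pyRange 0 i).filter
            (fun j => PySem.List.pyGetD (0 :: pvBuildD 0 cs) j 0 == PySem.List.pyGetD (0 :: pvBuildD 0 cs) i 0)) (fun x => x) with
        | none => ([] : List Char)
        | some j => PySem.List.slice cs (some j) (some i)) := by
    by_cases hc : ¬ (cL = '(' ∨ cL = ')')
    · rw [if_pos hc, if_pos hc]
    · rw [if_neg hc, if_neg hc]
      push_neg at hc
      have hex := h3 (by rcases hc with h | h <;> [left; right] <;> rw [← h, hcL])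
      obtain ⟨j0, _, hA, hB⟩ := pvLeftScan cs i hex (by omega)
      rw [hA, hB]
  have hRight : (if ¬ (cR = '(' ∨ cR = ')') then [cR]
      else match pvLoopR cs (cs.length + 3) 0 i with
        | none => ([] : List Char)
        | some ri => PySem.List.slice cs (some i) (some ri))
      = (if ¬ (cR = '(' ∨ cR = ')') then [cR]
      else match PySem.List.min? ((PySem.List.pyRange i (cs.length : Int)).filter
            (fun q => PySem.List.pyGetD (0 :: pvBuildD 0 cs) (q + 1) 0 == PySem.List.pyGetD (0 :: pvBuildD 0 cs) i 0)) (fun x => x) with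
        | none => ([] : List Char)
        | some q => PySem.List.slice cs (some i) (some q)) := by
    by_cases hc : ¬ (cR = '(' ∨ cR = ')')
    · rw [if_pos hc, if_pos hc]
    · rw [if_neg hc, if_neg hc]
      push_neg at hc
      have h4' := h4 (by rcases hc with h | h <;> [left; right] <;> rw [← h, hcR])
      obtain ⟨hi0, hex⟩ := h4'
      obtain ⟨r0, _, _, hA, hB⟩ := pvRightScan cs i hi0 hex (by omega)
      rw [hA, hB]
  rw [hLeft, hRight]
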